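-- pv_equiv track=rewrite | github.com/KarishmaKaushikLab/B-AMP | scripts/residue_sorter/sorter.py | sort_residues
-- ===== SOURCE A (Python) =====
-- RESIDUE_TO_PRIORITY = {
--     "HIS168": 1,
--     "ARG239": 2,
--     "ASN236": 3,
--     "GLN143": 4,
--     "ASP139": 5,
--     "THR137": 6,
--     "ALA95": 7,
--     "LEU96": 8,
--     "PRO94": 9,
--     "THR169": 10,
--     "GLY170": 11,
--     "ILE235": 12,
--     "ARG98": 13,
--     "TYR233": 14,
--     "ALA172": 15,
--     "THR237": 16,
--     "GLY234": 17,
--     "ASP140": 18,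
--     "THR231": 19,
-- }
--
-- PRIORITY_TO_RESIDUE = [*RESIDUE_TO_PRIORITY.keys()]
--
-- def sort_residues(residues_str: str) -> str:
--     residues_list = residues_str.split(",")
--     residues_as_priorities = []
--
--     for residue in residues_list:
--         residue = residue.strip()
--
--         if residue == "NO H-BONDS":
--             continue
--
--         priority = RESIDUE_TO_PRIORITY.get(residue)
--         if priority:
--             residues_as_priorities.append(priority)
--
--     residues_as_priorities.sort()
--
--     sorted_residues = [
--         PRIORITY_TO_RESIDUE[priority - 1] for priority in residues_as_priorities
--     ]
--
--     sorted_residues_as_str = ""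
--
--     for index, residue in enumerate(sorted_residues):
--         sorted_residues_as_str += residue
--
--         if not index == len(sorted_residues) - 1:
--             sorted_residues_as_str += ","
--
--     return sorted_residues_as_str
-- ===== SOURCE B (Python) =====
-- PRIORITY_TO_RESIDUE = [
--     "HIS168", "ARG239", "ASN236", "GLN143", "ASP139", "THR137", "ALA95",
--     "LEU96", "PRO94", "THR169", "GLY170", "ILE235", "ARG98", "TYR233",
--     "ALA172", "THR237", "GLY234", "ASP140", "THR231",
-- ]
--
-- def sort_residues(residues_str: str) -> str:
--     counts = {}
--     for token in residues_str.split(","):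
--         token = token.strip()
--         counts[token] = counts.get(token, 0) + 1
--     return ",".join(res for res in PRIORITY_TO_RESIDUE
--                     for _ in range(counts.get(res, 0)))
-- ===== Notes on version B (the rewrite author's own statement) =====
-- stated objective: alternative
-- what changed: Instead of mapping tokens to priority numbers, sorting them and mapping back with a manual last-comma join loop, B builds a token counter in one pass and then sweeps the priority table once in its fixed order, emitting each residue count-many times, joined with ','.join — no sorting at all.
import Mathlib
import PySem

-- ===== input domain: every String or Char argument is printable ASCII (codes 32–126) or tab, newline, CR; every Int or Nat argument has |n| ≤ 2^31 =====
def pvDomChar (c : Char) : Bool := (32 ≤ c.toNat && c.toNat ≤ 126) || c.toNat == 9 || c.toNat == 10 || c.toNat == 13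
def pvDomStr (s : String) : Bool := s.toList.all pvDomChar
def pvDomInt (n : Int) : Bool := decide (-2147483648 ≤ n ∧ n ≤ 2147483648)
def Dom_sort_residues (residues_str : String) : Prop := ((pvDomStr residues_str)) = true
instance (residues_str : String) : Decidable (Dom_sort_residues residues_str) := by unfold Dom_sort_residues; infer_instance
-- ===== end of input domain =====

-- B replaces A's map-to-priorities / sort / map-back / manual-join pipeline by one counting pass
-- (a token counter, then a single ordered sweep over the priority table emitting each residue
-- count-many times): no sorting at all — objective: alternative.

-- the module-level dict RESIDUE_TO_PRIORITY, as its association list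
def pvResidueTable : List (String × Int) :=
  [("HIS168", 1), ("ARG239", 2), ("ASN236", 3), ("GLN143", 4), ("ASP139", 5),
   ("THR137", 6), ("ALA95", 7), ("LEU96", 8), ("PRO94", 9), ("THR169", 10),
   ("GLY170", 11), ("ILE235", 12), ("ARG98", 13), ("TYR233", 14), ("ALA172", 15),
   ("THR237", 16), ("GLY234", 17), ("ASP140", 18), ("THR231", 19)]

def pvResidueToPriority : PySem.Dict String Int := PySem.Dict.mk pvResidueTable

-- PRIORITY_TO_RESIDUE = [*RESIDUE_TO_PRIORITY.keys()]
def pvPriorityToResidue : List String := pvResidueTable.map Prod.fst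

-- s.split(","): the separator "," is nonempty, so PySem.Str.split? is always `some` (exact)
def pvSplitComma (s : String) : List String := (PySem.Str.split? s ",").getD []

-- ===== PORT A =====
-- residues_as_priorities: A's filtering loop over the split tokens
def pvResiduesAsPriorities (residues_list : List String) : List Int :=
  residues_list.foldl (fun acc residue =>
    let residue := PySem.Str.strip residue
    if residue == "NO H-BONDS" then acc
    else
      match pvResidueToPriority.get? residue with        -- RESIDUE_TO_PRIORITY.get(residue)
      | some priority => if priority ≠ 0 then acc ++ [priority] else acc  -- `if priority:` truthiness
      | none => acc) []

-- sorted_residues = [PRIORITY_TO_RESIDUE[priority - 1] for priority in sorted priorities]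
-- (the index priority-1 is always in range here, so `.getD ""` is never the IndexError case)
def pvSortedResidues (residues_str : String) : List String :=
  (PySem.List.sorted (pvResiduesAsPriorities (pvSplitComma residues_str)) (fun x => x)).map
    (fun priority => (PySem.List.pyGet? pvPriorityToResidue (priority - 1)).getD "")

-- the `sorted_residues_as_str +=` loop, carried over List Char (same concatenations, exact)
def pvJoinLoop (sorted_residues : List String) : List Char :=
  (PySem.List.enumerate sorted_residues).foldl
    (fun acc p =>
      let acc := acc ++ p.2.toList
      if p.1 ≠ (sorted_residues.length : Int) - 1 then acc ++ [','] else acc) []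

def sort_residues (residues_str : String) : String :=
  String.ofList (pvJoinLoop (pvSortedResidues residues_str))

-- ===== PORT B =====
-- B's counting loop: counts[token] = counts.get(token, 0) + 1 over the stripped tokens
def pvCounts (residues_str : String) : PySem.Dict String Int :=
  (pvSplitComma residues_str).foldl
    (fun counts token =>
      let token := PySem.Str.strip token
      counts.insert token (counts.getD token 0 + 1))
    (PySem.Dict.mk [])

def sort_residues_alt (residues_str : String) : String :=
  PySem.Str.join "," (pvPriorityToResidue.flatMap
    (fun res => List.replicate ((pvCounts residues_str).getD res 0).toNat res))

-- ===== PRECONDITION & SPEC =====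
def Spec_sort_residues (residues_str : String) (out : String) : Prop := out = sort_residues_alt residues_str
instance (residues_str : String) (out : String) : Decidable (Spec_sort_residues residues_str out) := by unfold Spec_sort_residues; infer_instance

-- ===== CLAIM (what is proved, stated in full; the proofs are below) =====
def Claim_equal_sort_residues : Prop := ∀ (residues_str : String), Dom_sort_residues residues_str → Spec_sort_residues residues_str (sort_residues residues_str)

-- ===== LEMMAS AND PROOFS =====

-- the stripped tokens
def pvToks (s : String) : List String := (pvSplitComma s).map PySem.Str.strip

-- what A's filtering loop keeps of one stripped token
def pvLook (r : String) : Option Int :=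
  if r == "NO H-BONDS" then none
  else
    match pvResidueToPriority.get? r with
    | some priority => if priority ≠ 0 then some priority else none
    | none => none

theorem pv_get?_mk_eq_some_iff (t : List (String × Int)) (hk : (t.map Prod.fst).Nodup)
    (r : String) (k : Int) : (PySem.Dict.mk t).get? r = some k ↔ (r, k) ∈ t := by
  induction t with
  | nil => simp [PySem.Dict.get?]
  | cons p rest ih =>
    obtain ⟨a, v⟩ := p
    simp only [List.map_cons, List.nodup_cons] at hk
    rw [PySem.Dict.get?_mk_cons]
    by_cases har : a = r
    · subst har
      rw [if_pos (by simp)]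
      constructor
      · intro h
        obtain rfl := Option.some_inj.mp h
        exact List.mem_cons_self
      · intro hmem
        rcases List.mem_cons.mp hmem with heq | hmem'
        · rw [Prod.mk.injEq] at heq
          rw [heq.2]
        · exact absurd (List.mem_map_of_mem (f := Prod.fst) hmem') hk.1
    · have hbe : (a == r) = false := by simpa using har
      rw [hbe]
      simp only [Bool.false_eq_true, if_false, List.mem_cons, Prod.mk.injEq]
      rw [ih hk.2]
      constructor
      · exact Or.inr
      · rintro (⟨h1, -⟩ | h)
        · exact absurd h1.symm har
        · exact h

theorem pvLook_eq_some_iff (r : String) (k : Int) :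
    pvLook r = some k ↔ (r, k) ∈ pvResidueTable := by
  have hk : (pvResidueTable.map Prod.fst).Nodup := by decide
  have hget := pv_get?_mk_eq_some_iff pvResidueTable hk r k
  constructor
  · intro h
    unfold pvLook at h
    by_cases h1 : (r == "NO H-BONDS") = true
    · rw [if_pos h1] at h; cases h
    · rw [if_neg h1] at h
      rcases hg : pvResidueToPriority.get? r with _ | p
      · rw [hg] at h
        rw [show (match (none : Option Int) with
            | some priority => if priority ≠ 0 then some priority else none
            | none => none) = (none : Option Int) from rfl] at h
        cases h
      · rw [hg] at h
        rw [show (match (some p : Option Int) with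
            | some priority => if priority ≠ 0 then some priority else none
            | none => none) = (if p ≠ 0 then some p else none) from rfl] at h
        by_cases h2 : p ≠ 0
        · rw [if_pos h2] at h
          obtain rfl := Option.some_inj.mp h
          exact hget.mp hg
        · rw [if_neg h2] at h; cases h
  · intro hmem
    have hr : r ≠ "NO H-BONDS" := by
      have hno : ∀ q ∈ pvResidueTable, q.1 ≠ "NO H-BONDS" := by decide
      exact hno (r, k) hmem
    have hk0 : k ≠ 0 := by
      have hnz : ∀ q ∈ pvResidueTable, q.2 ≠ 0 := by decide
      exact hnz (r, k) hmem
    have hgr : pvResidueToPriority.get? r = some k := hget.mpr hmem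
    unfold pvLook
    rw [if_neg (by simpa using hr), hgr]
    rw [show (match (some k : Option Int) with
        | some priority => if priority ≠ 0 then some priority else none
        | none => none) = (if k ≠ 0 then some k else none) from rfl]
    rw [if_pos hk0]

-- A's loop body appends (pvLook (strip t)).toList
theorem pv_foldl_opt {α β : Type} (f : α → Option β) (g : List β → α → List β)
    (hg : ∀ acc x, g acc x = acc ++ (f x).toList) :
    ∀ (l : List α) (acc : List β), l.foldl g acc = acc ++ l.filterMap f := by
  intro l
  induction l with
  | nil => intro acc; simp
  | cons x l ih =>
    intro acc
    rw [List.foldl_cons, hg, ih, List.filterMap_cons]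
    cases h : f x
    · simp
    · simp

theorem pvResiduesAsPriorities_eq (l : List String) :
    pvResiduesAsPriorities l = (l.map PySem.Str.strip).filterMap pvLook := by
  rw [List.filterMap_map]
  unfold pvResiduesAsPriorities
  rw [pv_foldl_opt (fun t => pvLook (PySem.Str.strip t)) _ ?_ l []]
  · rfl
  intro acc t
  show (if PySem.Str.strip t == "NO H-BONDS" then acc
        else
          match pvResidueToPriority.get? (PySem.Str.strip t) with
          | some priority => if priority ≠ 0 then acc ++ [priority] else acc
          | none => acc)
      = acc ++ (pvLook (PySem.Str.strip t)).toList
  unfold pvLook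
  by_cases h1 : (PySem.Str.strip t == "NO H-BONDS") = true
  · rw [if_pos h1, if_pos h1]; simp
  · rw [if_neg h1, if_neg h1]
    rcases hg : pvResidueToPriority.get? (PySem.Str.strip t) with _ | p
    · simp
    · by_cases h2 : p ≠ 0
      · simp [h2]
      · simp [h2]

theorem pv_count_flatMap_replicate (vs : List Int) (hnd : vs.Nodup) (c : Int → Nat) (x : Int) :
    (vs.flatMap fun k => List.replicate (c k) k).count x = if x ∈ vs then c x else 0 := by
  induction vs with
  | nil => simp
  | cons v rest ih =>
    simp only [List.nodup_cons] at hnd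
    rw [List.flatMap_cons, List.count_append, ih hnd.2, List.count_replicate]
    by_cases hxv : x = v
    · subst hxv
      simp [hnd.1]
    · have h1 : (v == x) = false := by
        rw [beq_eq_false_iff_ne]
        exact fun h => hxv h.symm
      simp [h1, List.mem_cons, hxv]

theorem pv_pairwise_flatMap_replicate (vs : List Int) (h : vs.Pairwise (· < ·)) (c : Int → Nat) :
    (vs.flatMap fun k => List.replicate (c k) k).Pairwise (· ≤ ·) := by
  induction vs with
  | nil => simp
  | cons v rest ih =>
    rw [List.pairwise_cons] at h
    rw [List.flatMap_cons, List.pairwise_append]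
    refine ⟨List.pairwise_replicate.2 (Or.inr le_rfl), ih h.2, ?_⟩
    intro a ha b hb
    have ha' : a = v := List.eq_of_mem_replicate ha
    rw [List.mem_flatMap] at hb
    obtain ⟨k, hk, hbk⟩ := hb
    have hb' : b = k := List.eq_of_mem_replicate hbk
    subst ha'; subst hb'
    exact le_of_lt (h.1 _ hk)

-- sorting the kept priorities = one sweep over the table, each priority repeated its count
theorem pv_sorted_eq (P : List Int) (hsub : ∀ x ∈ P, x ∈ pvResidueTable.map Prod.snd) :
    PySem.List.sorted P (fun x => x)
      = (pvResidueTable.map Prod.snd).flatMap (fun k => List.replicate (P.count k) k) := by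
  have hnd : (pvResidueTable.map Prod.snd).Nodup := by decide
  have hpw : (pvResidueTable.map Prod.snd).Pairwise (· < ·) := by decide
  refine PySem.List.sorted_id_eq_of_perm_of_pairwise _ _ ?_ (pv_pairwise_flatMap_replicate _ hpw _)
  rw [List.perm_iff_count]
  intro a
  rw [pv_count_flatMap_replicate _ hnd]
  by_cases ha : a ∈ pvResidueTable.map Prod.snd
  · rw [if_pos ha]
  · rw [if_neg ha]
    have hnp : a ∉ P := fun h => ha (hsub a h)
    simp [List.count_eq_zero_of_not_mem hnp]

-- per table entry: pvLook hits exactly that entry's name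
theorem pvLook_beq (p : String × Int) (hmem : p ∈ pvResidueTable) (r : String) :
    (pvLook r == some p.2) = (r == p.1) := by
  have hsnd : (pvResidueTable.map Prod.snd).Nodup := by decide
  by_cases hr : r = p.1
  · have hmem' : (r, p.2) ∈ pvResidueTable := by rw [hr]; exact hmem
    have h1 : pvLook r = some p.2 := (pvLook_eq_some_iff r p.2).mpr hmem'
    rw [hr] at h1
    simp [h1, hr]
  · have hbe : (r == p.1) = false := by simpa using hr
    rw [hbe]
    by_cases hl : pvLook r = some p.2
    · exfalso
      have h2 : (r, p.2) ∈ pvResidueTable := (pvLook_eq_some_iff r p.2).mp hl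
      have h4 := List.inj_on_of_nodup_map (f := Prod.snd) hsnd h2 hmem rfl
      exact hr (congrArg Prod.fst h4)
    · simpa using hl

theorem pv_count_entry (s : String) (p : String × Int) (hmem : p ∈ pvResidueTable) :
    ((pvToks s).filterMap pvLook).count p.2 = (pvToks s).count p.1 := by
  rw [List.count_filterMap, List.count_eq_countP]
  apply List.countP_congr
  intro r _
  rw [pvLook_beq p hmem r]

-- the join loop of A produces Chars.join
theorem pv_join_loop (n : Int) (ws : List String) : ∀ (s : Int) (acc : List Char),
    s + ws.length ≤ n →
    (PySem.List.enumerate ws s).foldl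
      (fun acc p =>
        let acc := acc ++ p.2.toList
        if p.1 ≠ n - 1 then acc ++ [','] else acc) acc
    = acc ++ (if ws = [] then [] else
        PySem.Chars.join [','] (ws.map String.toList)
          ++ (if s + ws.length ≠ n then [','] else [])) := by
  induction ws with
  | nil => intro s acc _; simp [PySem.List.enumerate_nil]
  | cons w t ih =>
    intro s acc h
    rw [PySem.List.enumerate_cons, List.foldl_cons]
    rcases t with _ | ⟨q, rest⟩
    · have hstep : (let a := acc ++ (s, w).2.toList
          ; if (s, w).1 ≠ n - 1 then a ++ [','] else a)
          = acc ++ w.toList ++ (if s + 1 ≠ n then [','] else []) := by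
        show (if s ≠ n - 1 then (acc ++ w.toList) ++ [','] else acc ++ w.toList) = _
        by_cases hc : s + 1 ≠ n
        · rw [if_pos (by omega), if_pos hc]
        · rw [if_neg (by omega), if_neg hc, List.append_nil]
      rw [hstep, PySem.List.enumerate_nil, List.foldl_nil]
      rw [if_neg (List.cons_ne_nil w [])]
      simp [PySem.Chars.join_singleton, List.append_assoc]
    · simp only [List.length_cons] at h
      push_cast at h
      have hstep : (let a := acc ++ (s, w).2.toList
          ; if (s, w).1 ≠ n - 1 then a ++ [','] else a)
          = acc ++ w.toList ++ [','] := by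
        show (if s ≠ n - 1 then (acc ++ w.toList) ++ [','] else acc ++ w.toList) = _
        rw [if_pos (by omega)]
      rw [hstep, ih (s + 1) _ (by simp only [List.length_cons]; push_cast; omega)]
      rw [if_neg (List.cons_ne_nil q rest), if_neg (List.cons_ne_nil w (q :: rest))]
      have harith : s + 1 + (((q :: rest).length : Nat) : Int)
          = s + (((w :: q :: rest).length : Nat) : Int) := by
        simp only [List.length_cons]; push_cast; ring
      rw [harith]
      simp only [List.map_cons]
      rw [PySem.Chars.join_cons_cons]
      simp [List.append_assoc]

theorem pvJoinLoop_eq (ws : List String) :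
    pvJoinLoop ws = PySem.Chars.join [','] (ws.map String.toList) := by
  rcases ws with _ | ⟨w, t⟩
  · unfold pvJoinLoop
    simp [PySem.List.enumerate_nil, PySem.Chars.join_nil]
  · unfold pvJoinLoop
    rw [pv_join_loop (((w :: t).length : Nat) : Int) (w :: t) 0 [] (by simp)]
    rw [if_neg (List.cons_ne_nil w t),
      if_neg (show ¬(0 + (((w :: t).length : Nat) : Int) ≠ (((w :: t).length : Nat) : Int)) by omega)]
    simp

-- B's counter reads back token counts
theorem pvCounts_getD (s : String) (r : String) :
    (pvCounts s).getD r 0 = ((pvToks s).count r : Int) := by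
  have h1 : pvCounts s
      = (pvToks s).foldl (fun d x => d.insert x (d.getD x 0 + 1)) (PySem.Dict.mk []) := by
    unfold pvCounts pvToks
    rw [List.foldl_map]
  rw [h1, PySem.Dict.getD_foldl_insert_add_one]
  have h0 : (PySem.Dict.mk ([] : List (String × Int))).getD r 0 = 0 := rfl
  rw [h0, zero_add]

theorem pv_flatMap_congr {α β : Type} (l : List α) (f g : α → List β)
    (h : ∀ x ∈ l, f x = g x) : l.flatMap f = l.flatMap g := by
  simp only [List.flatMap_def]
  rw [List.map_congr_left h]

-- the two word lists agree
theorem pv_words_eq (s : String) :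
    pvSortedResidues s
      = pvPriorityToResidue.flatMap
          (fun res => List.replicate ((pvCounts s).getD res 0).toNat res) := by
  unfold pvSortedResidues
  rw [pvResiduesAsPriorities_eq]
  set P := ((pvSplitComma s).map PySem.Str.strip).filterMap pvLook with hP
  have hPtoks : P = (pvToks s).filterMap pvLook := rfl
  have hsub : ∀ x ∈ P, x ∈ pvResidueTable.map Prod.snd := by
    intro x hx
    rw [hP, List.mem_filterMap] at hx
    obtain ⟨t, -, ht⟩ := hx
    have := (pvLook_eq_some_iff t x).mp ht
    exact List.mem_map_of_mem (f := Prod.snd) this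
  rw [pv_sorted_eq P hsub]
  unfold pvPriorityToResidue
  rw [List.flatMap_map, List.flatMap_map, List.map_flatMap]
  apply pv_flatMap_congr
  intro p hp
  have hg : (PySem.List.pyGet? (pvResidueTable.map Prod.fst) (p.2 - 1)).getD "" = p.1 := by
    have hall : ∀ q ∈ pvResidueTable,
        (PySem.List.pyGet? (pvResidueTable.map Prod.fst) (q.2 - 1)).getD "" = q.1 := by decide
    exact hall p hp
  have hc : ((pvCounts s).getD p.1 0).toNat = P.count p.2 := by
    rw [pvCounts_getD, hPtoks, pv_count_entry s p hp]
    simp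
  simp [List.map_replicate, hc, hg]

-- ===== VERDICT (by name: the statement is the Claim_ definition above) =====
theorem sort_residues_spec : Claim_equal_sort_residues := by
  intro s _
  unfold Spec_sort_residues sort_residues sort_residues_alt
  rw [pvJoinLoop_eq, pv_words_eq]
  have hjoin : PySem.Str.join ","
      (pvPriorityToResidue.flatMap
        (fun res => List.replicate ((pvCounts s).getD res 0).toNat res))
      = String.ofList (PySem.Chars.join [',']
          ((pvPriorityToResidue.flatMap
            (fun res => List.replicate ((pvCounts s).getD res 0).toNat res)).map String.toList)) := by
    conv_lhs => rw [← String.ofList_toList (s := PySem.Str.join "," _)]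
    rw [PySem.Str.toList_join, show (",".toList) = [','] from rfl]
  rw [hjoin]
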